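-- pv_equiv track=rewrite | github.com/linbiaotongzhiyongyuanjiankang/Direct-NN-incoming | seekfind/__init__.py | skf
-- ===== SOURCE A (Python) =====
-- def skf(pan, root):
--     index_record = []
--     for i in range(0, len(root)):
--         temp = []
--         for j in range(0, len(pan)):
--             if pan[j] == root[i]:
--                 temp.append(j)
--             if j + 1 == len(pan):
--                 index_record = index_record + [temp]
--     return index_record
-- ===== SOURCE B (Python) =====
-- def skf(pan, root):
--     idx = {}
--     for j, x in enumerate(pan):
--         idx.setdefault(x, []).append(j)
--     return [idx.get(v, []) for v in root]
-- ===== Notes on version B (the rewrite author's own statement) =====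
-- stated objective: faster
-- what changed: Replaces the nested scan of pan for every root element by a single pass building a value->indices dictionary over pan, followed by one O(1) lookup per root element.
-- outside the precondition, e.g. on skf([], [1, 2]): A returns [], B returns [[], []]
import Mathlib
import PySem

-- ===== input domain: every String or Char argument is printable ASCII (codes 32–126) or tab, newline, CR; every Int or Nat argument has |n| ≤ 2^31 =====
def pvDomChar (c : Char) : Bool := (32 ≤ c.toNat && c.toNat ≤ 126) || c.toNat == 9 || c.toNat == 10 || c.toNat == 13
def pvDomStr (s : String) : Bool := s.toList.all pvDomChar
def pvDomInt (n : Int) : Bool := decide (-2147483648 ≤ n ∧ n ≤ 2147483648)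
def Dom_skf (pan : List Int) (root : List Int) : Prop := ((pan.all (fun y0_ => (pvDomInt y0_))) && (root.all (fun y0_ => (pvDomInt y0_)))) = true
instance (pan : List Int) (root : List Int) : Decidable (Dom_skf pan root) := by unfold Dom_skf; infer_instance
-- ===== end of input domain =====

-- B replaces A's rescans of pan per root element by one value→indices dictionary built in
-- a single pass over pan, then one lookup per root element (asymptotically fewer steps).

-- ===== PORT A =====
-- literal transliteration of A's nested index loops; inner state = (temp, index_record)
def skf (pan : List Int) (root : List Int) : List (List Int) :=
  (PySem.List.pyRange 0 root.length 1).foldl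
    (fun index_record i =>
      ((PySem.List.pyRange 0 pan.length 1).foldl
        (fun (st : List Int × List (List Int)) j =>
          let temp := if PySem.List.pyGetD pan j 0 == PySem.List.pyGetD root i 0
                      then st.1 ++ [j] else st.1
          (temp, if j + 1 = (pan.length : Int) then st.2 ++ [temp] else st.2))
        ([], index_record)).2)
    []

-- ===== PORT B =====
-- idx.setdefault(x, []).append(j)  ==  modify x [] (· ++ [j])
def skfIdx (pan : List Int) : PySem.Dict Int (List Int) :=
  (PySem.List.enumerate pan 0).foldl
    (fun d p => d.modify p.2 [] (fun l => l ++ [p.1])) PySem.Dict.empty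

def skf_alt (pan : List Int) (root : List Int) : List (List Int) :=
  root.map (fun v => (skfIdx pan).getD v [])

-- ===== PRECONDITION & SPEC =====
-- Pre_ excludes pan = [], on which A's inner loop never runs so A returns [] while B
-- returns one empty list per root element; both values are defensible on that corner.
def Pre_skf (pan : List Int) (root : List Int) : Prop := pan ≠ []
instance (pan : List Int) (root : List Int) : Decidable (Pre_skf pan root) := by unfold Pre_skf; infer_instance
def pvWitness_skf : List Int × List Int := ([1, 2, 1], [1, 3])

def Spec_skf (pan : List Int) (root : List Int) (out : List (List Int)) : Prop := out = skf_alt pan root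
instance (pan : List Int) (root : List Int) (out : List (List Int)) : Decidable (Spec_skf pan root out) := by unfold Spec_skf; infer_instance

-- ===== CLAIM (what is proved, stated in full; the proofs are below) =====
def Claim_equal_skf : Prop := ∀ (pan : List Int) (root : List Int), Dom_skf pan root → Pre_skf pan root → Spec_skf pan root (skf pan root)

-- ===== LEMMAS AND PROOFS =====

-- canonical value: indices (as Ints) of the elements of pan.drop a equal to v, offset by a
def occFrom (pan : List Int) (v : Int) (a : Nat) : List Int :=
  ((PySem.List.enumerate (pan.drop a) (a : Int)).filter (fun p => p.2 == v)).map (·.1)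

theorem occFrom_len (pan : List Int) (v : Int) : occFrom pan v pan.length = [] := by
  simp [occFrom]

theorem occFrom_step (pan : List Int) (v : Int) (a : Nat) (ha : a < pan.length) :
    occFrom pan v a
      = (if pan.getD a 0 == v then [(a : Int)] else []) ++ occFrom pan v (a + 1) := by
  have hd : pan.drop a = pan[a] :: pan.drop (a + 1) := List.drop_eq_getElem_cons ha
  have hg : pan.getD a 0 = pan[a] := List.getD_eq_getElem pan 0 ha
  simp only [occFrom, hd, hg, PySem.List.enumerate_cons, List.filter_cons]
  by_cases h : pan[a] = v
  · simp [h]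
  · simp [h]

-- B side: lookup in the fold-built dict is the filtered index list
theorem foldB_getD (v : Int) (es : List (Int × Int)) :
    ∀ (d : PySem.Dict Int (List Int)),
      (es.foldl (fun d p => d.modify p.2 [] (fun l => l ++ [p.1])) d).getD v []
        = d.getD v [] ++ (es.filter (fun p => p.2 == v)).map (·.1) := by
  induction es with
  | nil => intro d; simp
  | cons p es ih =>
    intro d
    rw [List.foldl_cons, ih, List.filter_cons]
    by_cases h : p.2 = v
    · subst h
      rw [PySem.Dict.getD_modify_self]
      simp
    · rw [PySem.Dict.getD_modify_of_ne _ _ _ (Ne.symm h)]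
      simp [h]

theorem skfIdx_getD (pan : List Int) (v : Int) :
    (skfIdx pan).getD v [] = occFrom pan v 0 := by
  rw [skfIdx, foldB_getD]
  simp [occFrom, PySem.Dict.getD]

-- A side: the inner loop from index pan.length - k, with fuel k
theorem innerA (pan : List Int) (v : Int) :
    ∀ (k : Nat), k ≤ pan.length → ∀ (temp : List Int) (acc : List (List Int)),
      (PySem.List.pyRange ((pan.length - k : Nat) : Int) (pan.length : Int) 1).foldl
        (fun (st : List Int × List (List Int)) j =>
          let temp := if PySem.List.pyGetD pan j 0 == v then st.1 ++ [j] else st.1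
          (temp, if j + 1 = (pan.length : Int) then st.2 ++ [temp] else st.2))
        (temp, acc)
      = (temp ++ occFrom pan v (pan.length - k),
         if 0 < k then acc ++ [temp ++ occFrom pan v (pan.length - k)] else acc) := by
  intro k
  induction k with
  | zero =>
    intro _ temp acc
    rw [PySem.List.pyRange_one_eq_nil (by omega)]
    simp [occFrom_len]
  | succ k ih =>
    intro hk temp acc
    have ha : pan.length - (k + 1) < pan.length := by omega
    rw [PySem.List.pyRange_one_cons (by exact_mod_cast ha), List.foldl_cons]
    have hget : PySem.List.pyGetD pan ((pan.length - (k + 1) : Nat) : Int) 0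
        = pan.getD (pan.length - (k + 1)) 0 := PySem.List.pyGetD_natCast _ _ _
    have hnext : ((pan.length - (k + 1) : Nat) : Int) + 1 = ((pan.length - k : Nat) : Int) := by
      omega
    rw [hnext, ih (by omega)]
    have hocc := occFrom_step pan v (pan.length - (k + 1)) ha
    have hsucc : pan.length - (k + 1) + 1 = pan.length - k := by omega
    rw [hsucc] at hocc
    by_cases hz : k = 0
    · subst hz
      by_cases hv : pan.getD (pan.length - (0 + 1)) 0 == v
      · have hv' : pan[pan.length - 1]?.getD 0 = v := by
          simpa [List.getD_eq_getElem?_getD] using hv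
        simp only [hget, hv, if_true]
        simp [hocc, hv', occFrom_len, List.getD_eq_getElem?_getD]
      · have hv' : ¬ pan[pan.length - 1]?.getD 0 = v := by
          simpa [List.getD_eq_getElem?_getD] using hv
        simp only [hget, hv]
        simp [hocc, hv', occFrom_len, List.getD_eq_getElem?_getD]
    · by_cases hv : pan.getD (pan.length - (k + 1)) 0 == v
      · have hv' : pan[pan.length - (k + 1)]?.getD 0 = v := by
          simpa [List.getD_eq_getElem?_getD] using hv
        have hkk : pan.length - k ≠ pan.length := by omega
        simp only [hget, hv, if_true]
        simp [hocc, hv', List.getD_eq_getElem?_getD, Nat.pos_of_ne_zero hz, hkk]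
      · have hv' : ¬ pan[pan.length - (k + 1)]?.getD 0 = v := by
          simpa [List.getD_eq_getElem?_getD] using hv
        have hkk : pan.length - k ≠ pan.length := by omega
        simp only [hget, hv]
        simp [hocc, hv', List.getD_eq_getElem?_getD, Nat.pos_of_ne_zero hz, hkk]

theorem skf_eq_map (pan : List Int) (root : List Int) (hp : pan ≠ []) :
    skf pan root = root.map (fun v => occFrom pan v 0) := by
  rw [skf]
  rw [PySem.List.foldl_pyRange_zero_pyGetD' root 0
      (fun index_record v =>
        ((PySem.List.pyRange 0 pan.length 1).foldl
          (fun (st : List Int × List (List Int)) j =>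
            let temp := if PySem.List.pyGetD pan j 0 == v then st.1 ++ [j] else st.1
            (temp, if j + 1 = (pan.length : Int) then st.2 ++ [temp] else st.2))
          ([], index_record)).2) []]
  have hlen : 0 < pan.length := List.length_pos_iff.mpr hp
  have hbody : ∀ (acc : List (List Int)) (v : Int),
      ((PySem.List.pyRange 0 pan.length 1).foldl
        (fun (st : List Int × List (List Int)) j =>
          let temp := if PySem.List.pyGetD pan j 0 == v then st.1 ++ [j] else st.1
          (temp, if j + 1 = (pan.length : Int) then st.2 ++ [temp] else st.2))
        ([], acc)).2 = acc ++ [occFrom pan v 0] := by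
    intro acc v
    have h := innerA pan v pan.length le_rfl [] acc
    simp only [Nat.sub_self, Nat.cast_zero] at h
    rw [h]
    simp [hlen]
  calc root.foldl _ []
      = root.foldl (fun acc v => acc ++ [occFrom pan v 0]) [] := by
        exact PySem.List.foldl_congr_mem root _ _ [] (fun acc v _ => hbody acc v)
    _ = root.map (fun v => occFrom pan v 0) := by
        simpa using PySem.List.foldl_append_singleton_eq_map (fun v => occFrom pan v 0) root []

-- ===== VERDICT (by name: the statement is the Claim_ definition above) =====
theorem skf_spec : Claim_equal_skf := by
  intro pan root _ hp
  unfold Spec_skf skf_alt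
  rw [skf_eq_map pan root hp]
  exact List.map_congr_left (fun v _ => (skfIdx_getD pan v).symm)
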